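-- pv_equiv track=rewrite | github.com/piyusharma00721/A2A-Multi-Agent_assesment | agents/enhanced_web_search_agent.py | is_current_information_needed
-- ===== SOURCE A (Python) =====
-- def is_current_information_needed(query: str) -> bool:
--     """Determine if the query requires current/updated information"""
--     current_indicators = [
--         'current', 'latest', 'recent', 'today', 'now', 'this year', '2024', '2025',
--         'weather', 'news', 'stock', 'price', 'election', 'covid', 'pandemic',
--         'breaking', 'update', 'just', 'happened', 'live', 'real-time'
--     ]
--     query_lower = query.lower()
--     return any(indicator in query_lower for indicator in current_indicators)
-- ===== SOURCE B (Python) =====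
-- # B: first-character dispatch index + one positional scan, instead of one
-- # independent substring search per indicator.
-- _INDEX = {}
-- for _w in [
--     'current', 'latest', 'recent', 'today', 'now', 'this year', '2024', '2025',
--     'weather', 'news', 'stock', 'price', 'election', 'covid', 'pandemic',
--     'breaking', 'update', 'just', 'happened', 'live', 'real-time'
-- ]:
--     _INDEX.setdefault(_w[0], []).append(_w[1:])
--
-- def is_current_information_needed(query: str) -> bool:
--     q = query.lower()
--     for i in range(len(q)):
--         for tail in _INDEX.get(q[i], []):
--             if q.startswith(tail, i + 1):
--                 return True
--     return False
-- ===== Notes on version B (the rewrite author's own statement) =====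
-- stated objective: alternative
-- what changed: Replaces 21 independent substring-containment searches with a first-character dispatch dictionary (indicator head -> list of tails) built once, then a single positional scan of the lowered query that only tests the indicators whose first character matches the current position.
import Mathlib
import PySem

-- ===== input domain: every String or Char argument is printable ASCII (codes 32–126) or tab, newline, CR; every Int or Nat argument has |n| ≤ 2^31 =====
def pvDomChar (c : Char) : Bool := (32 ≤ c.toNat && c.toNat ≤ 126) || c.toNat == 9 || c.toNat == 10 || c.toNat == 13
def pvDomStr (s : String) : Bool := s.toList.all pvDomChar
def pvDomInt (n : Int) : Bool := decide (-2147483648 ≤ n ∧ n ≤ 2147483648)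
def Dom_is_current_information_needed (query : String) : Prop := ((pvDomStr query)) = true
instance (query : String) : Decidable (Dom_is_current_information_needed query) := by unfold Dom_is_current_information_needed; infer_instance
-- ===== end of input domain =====

-- B builds a first-character dispatch index (indicator head char -> list of
-- tails) once and makes a single positional scan of the lowered query,
-- instead of A's 21 independent substring searches (objective: alternative).

-- ===== PORT A =====
def pvIndicators : List (List Char) :=
  ["current".toList, "latest".toList, "recent".toList, "today".toList, "now".toList,
   "this year".toList, "2024".toList, "2025".toList,
   "weather".toList, "news".toList, "stock".toList, "price".toList, "election".toList,
   "covid".toList, "pandemic".toList,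
   "breaking".toList, "update".toList, "just".toList, "happened".toList, "live".toList,
   "real-time".toList]

def is_current_information_needed (query : String) : Bool :=
  let query_lower := PySem.Chars.lower query.toList
  pvIndicators.any (fun indicator => PySem.Chars.isIn indicator query_lower)

-- ===== PORT B =====
-- the module-level word list Source B iterates over to build _INDEX
def pvWordsB : List (List Char) :=
  ["current".toList, "latest".toList, "recent".toList, "today".toList, "now".toList,
   "this year".toList, "2024".toList, "2025".toList,
   "weather".toList, "news".toList, "stock".toList, "price".toList, "election".toList,
   "covid".toList, "pandemic".toList,
   "breaking".toList, "update".toList, "just".toList, "happened".toList, "live".toList,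
   "real-time".toList]

-- one iteration of Source B's build loop: _INDEX.setdefault(w[0], []).append(w[1:])
-- (all words are nonempty; the [] branch is unreachable)
def pvStep (d : PySem.Dict Char (List (List Char))) (w : List Char) :
    PySem.Dict Char (List (List Char)) :=
  match w with
  | [] => d
  | c :: tl => d.modify c [] (· ++ [tl])

def pvIndex : PySem.Dict Char (List (List Char)) :=
  pvWordsB.foldl pvStep PySem.Dict.empty

-- the scan loop: for i in range(len(q)): for tail in _INDEX.get(q[i], []): q.startswith(tail, i+1)
def pvScanB : List Char → Bool
  | [] => false
  | c :: rest =>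
      (pvIndex.getD c []).any (fun tl => PySem.Chars.startswith rest tl) || pvScanB rest

def is_current_information_needed_alt (query : String) : Bool :=
  pvScanB (PySem.Chars.lower query.toList)

-- ===== PRECONDITION & SPEC =====
def Spec_is_current_information_needed (query : String) (out : Bool) : Prop := out = is_current_information_needed_alt query
instance (query : String) (out : Bool) : Decidable (Spec_is_current_information_needed query out) := by unfold Spec_is_current_information_needed; infer_instance

-- ===== CLAIM (what is proved, stated in full; the proofs are below) =====
def Claim_equal_is_current_information_needed : Prop := ∀ (query : String), Dom_is_current_information_needed query → Spec_is_current_information_needed query (is_current_information_needed query)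

-- ===== LEMMAS AND PROOFS =====

theorem pvIndicators_ne_nil : ∀ ind ∈ pvIndicators, ind ≠ [] := by decide

-- what the build loop leaves under key c: the tails of the words starting with c, in order
theorem foldl_pvStep_getD (ws : List (List Char))
    (d : PySem.Dict Char (List (List Char))) (c : Char) :
    (ws.foldl pvStep d).getD c [] =
      d.getD c [] ++ ws.filterMap (fun w =>
        match w with
        | [] => none
        | h :: t => if h = c then some t else none) := by
  induction ws generalizing d with
  | nil => simp
  | cons w ws ih =>
      cases w with
      | nil => simpa [pvStep] using ih d
      | cons h t =>
          simp only [List.foldl_cons, pvStep, ih, List.filterMap_cons]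
          rw [PySem.Dict.getD_modify]
          by_cases hc : c = h
          · subst hc; simp [List.append_assoc]
          · simp [hc, Ne.symm hc]

theorem mem_pvIndex_getD (c : Char) (tl : List Char) :
    tl ∈ pvIndex.getD c [] ↔ (c :: tl) ∈ pvWordsB := by
  rw [pvIndex, foldl_pvStep_getD]
  simp only [PySem.Dict.getD_empty, List.nil_append, List.mem_filterMap]
  constructor
  · rintro ⟨w, hw, h⟩
    cases w with
    | nil => simp at h
    | cons h' t' =>
        by_cases hh : h' = c
        · subst hh; simp at h; subst h; exact hw
        · simp [hh] at h
  · intro hmem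
    exact ⟨c :: tl, hmem, by simp⟩

theorem pvScanB_iff (q : List Char) :
    pvScanB q = true ↔ ∃ ind ∈ pvIndicators, ∃ j, ind <+: q.drop j := by
  have hwords : pvWordsB = pvIndicators := rfl
  induction q with
  | nil =>
      simp only [pvScanB, Bool.false_eq_true, false_iff]
      rintro ⟨ind, hmem, j, hpre⟩
      have : ind = [] := List.prefix_nil.mp (by simpa using hpre)
      exact pvIndicators_ne_nil ind hmem this
  | cons c rest ih =>
      simp only [pvScanB, Bool.or_eq_true, ih, List.any_eq_true,
        PySem.Chars.startswith_iff]
      constructor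
      · rintro (⟨tl, htl, hpre⟩ | ⟨ind, hmem, j, hpre⟩)
        · refine ⟨c :: tl, hwords ▸ (mem_pvIndex_getD c tl).mp htl, 0, ?_⟩
          simpa [List.cons_prefix_cons] using hpre
        · exact ⟨ind, hmem, j + 1, by simpa using hpre⟩
      · rintro ⟨ind, hmem, j, hpre⟩
        cases j with
        | zero =>
            cases ind with
            | nil => exact absurd rfl (pvIndicators_ne_nil [] hmem)
            | cons h t =>
                simp only [List.drop_zero, List.cons_prefix_cons] at hpre
                obtain ⟨rfl, hpre⟩ := hpre
                exact Or.inl ⟨t, (mem_pvIndex_getD h t).mpr (hwords ▸ hmem), hpre⟩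
        | succ j => exact Or.inr ⟨ind, hmem, j, by simpa using hpre⟩

theorem pvScanB_eq_any_isIn (q : List Char) :
    pvScanB q = pvIndicators.any (fun ind => PySem.Chars.isIn ind q) := by
  rw [Bool.eq_iff_iff, pvScanB_iff, List.any_eq_true]
  constructor
  · rintro ⟨ind, hmem, hj⟩
    exact ⟨ind, hmem, (PySem.Chars.exists_prefix_drop_iff_isIn ind q).mp hj⟩
  · rintro ⟨ind, hmem, hin⟩
    exact ⟨ind, hmem, (PySem.Chars.exists_prefix_drop_iff_isIn ind q).mpr hin⟩

-- ===== VERDICT (by name: the statement is the Claim_ definition above) =====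
theorem is_current_information_needed_spec : Claim_equal_is_current_information_needed := by
  intro query _
  unfold Spec_is_current_information_needed is_current_information_needed is_current_information_needed_alt
  exact (pvScanB_eq_any_isIn (PySem.Chars.lower query.toList)).symm
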